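-- pv_equiv track=rewrite | github.com/urvishdesai/velox | .github/scripts/detect-build-impact.py | compute_selective_build_targets
-- ===== SOURCE A (Python) =====
-- def compute_selective_build_targets(
--     affected: set[str], target_deps: dict[str, list[str]]
-- ) -> set[str]:
--     """Find the minimal set of root targets that cover all affected targets.
--
--     These are affected targets that are not a dependency of any other
--     affected target.
--     """
--     depended_upon = set()
--     for target in affected:
--         for dep in target_deps.get(target, []):
--             if dep in affected:
--                 depended_upon.add(dep)
--
--     return affected - depended_upon
-- ===== SOURCE B (Python) =====
-- def compute_selective_build_targets(
--     affected: set[str], target_deps: dict[str, list[str]]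
-- ) -> set[str]:
--     """Find the minimal set of root targets that cover all affected targets.
--
--     A target is a root iff no affected target (including itself) lists it
--     as a dependency; keep exactly those, by per-candidate rescanning.
--     """
--     return {
--         t
--         for t in affected
--         if not any(t in target_deps.get(o, []) for o in affected)
--     }
-- ===== Notes on version B (the rewrite author's own statement) =====
-- stated objective: alternative
-- what changed: Replaced the push-style accumulator (build a depended_upon set over a nested loop, then subtract it) by a single pull-style filtering comprehension that keeps t iff no affected target's dependency list contains it; nothing is maintained across the outer loop.
import Mathlib
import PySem

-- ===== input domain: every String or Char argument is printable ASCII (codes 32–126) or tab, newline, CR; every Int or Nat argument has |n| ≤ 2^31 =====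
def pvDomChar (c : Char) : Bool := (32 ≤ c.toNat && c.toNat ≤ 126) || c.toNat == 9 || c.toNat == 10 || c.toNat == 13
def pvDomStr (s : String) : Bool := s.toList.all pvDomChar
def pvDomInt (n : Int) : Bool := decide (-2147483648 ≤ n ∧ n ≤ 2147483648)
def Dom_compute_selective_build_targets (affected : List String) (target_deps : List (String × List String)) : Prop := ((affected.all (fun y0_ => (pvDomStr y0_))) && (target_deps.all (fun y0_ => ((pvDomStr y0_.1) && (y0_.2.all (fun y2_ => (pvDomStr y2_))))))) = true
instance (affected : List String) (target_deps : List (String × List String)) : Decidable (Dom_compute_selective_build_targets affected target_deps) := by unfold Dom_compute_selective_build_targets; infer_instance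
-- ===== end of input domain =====

-- ===== PORT A =====
-- A: accumulate the depended-upon affected targets into a set over a nested loop, then subtract.
def compute_selective_build_targets (affected : List String) (target_deps : List (String × List String)) : List String :=
  let depended_upon : PySem.Set String :=
    affected.foldl (fun depended target =>
      ((PySem.Dict.mk target_deps).getD target []).foldl (fun depended dep =>
        if affected.contains dep then PySem.Set.add depended dep else depended)
        depended)
      PySem.Set.empty
  PySem.Set.diff affected depended_upon

-- ===== PORT B =====
-- B: per-candidate rescan — keep t iff no affected target's dependency list contains it.
def compute_selective_build_targets_alt (affected : List String) (target_deps : List (String × List String)) : List String :=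
  affected.filter (fun t =>
    ! affected.any (fun o => ((PySem.Dict.mk target_deps).getD o []).contains t))

-- ===== PRECONDITION & SPEC =====
def Spec_compute_selective_build_targets (affected : List String) (target_deps : List (String × List String)) (out : List String) : Prop := out = compute_selective_build_targets_alt affected target_deps
instance (affected : List String) (target_deps : List (String × List String)) (out : List String) : Decidable (Spec_compute_selective_build_targets affected target_deps out) := by unfold Spec_compute_selective_build_targets; infer_instance

-- ===== CLAIM (what is proved, stated in full; the proofs are below) =====
def Claim_equal_compute_selective_build_targets : Prop := ∀ (affected : List String) (target_deps : List (String × List String)), Dom_compute_selective_build_targets affected target_deps → Spec_compute_selective_build_targets affected target_deps (compute_selective_build_targets affected target_deps)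

-- ===== LEMMAS AND PROOFS =====

-- membership in the inner accumulation over one dependency list
theorem pv_mem_inner (l s aff : List String) (t : String) :
    t ∈ l.foldl (fun depended dep =>
        if aff.contains dep then PySem.Set.add depended dep else depended) s
      ↔ t ∈ s ∨ (t ∈ l ∧ t ∈ aff) := by
  induction l generalizing s with
  | nil => simp
  | cons a l ih =>
    simp only [List.foldl_cons, ih]
    by_cases h : a ∈ aff
    · simp [h, PySem.Set.mem_add]
      constructor
      · rintro ((h1 | rfl) | ⟨h1, h2⟩)
        · exact .inl h1
        · exact .inr ⟨.inl rfl, h⟩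
        · exact .inr ⟨.inr h1, h2⟩
      · rintro (h1 | ⟨(rfl | h1), h2⟩)
        · exact .inl (.inl h1)
        · exact .inl (.inr rfl)
        · exact .inr ⟨h1, h2⟩
    · simp [h]
      constructor
      · rintro (h1 | ⟨h1, h2⟩)
        · exact .inl h1
        · exact .inr ⟨.inr h1, h2⟩
      · rintro (h1 | ⟨(rfl | h1), h2⟩)
        · exact .inl h1
        · exact absurd h2 h
        · exact .inr ⟨h1, h2⟩

-- membership in the full accumulated depended_upon set
theorem pv_mem_outer (os : List String) (s aff : List String)
    (td : List (String × List String)) (t : String) :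
    t ∈ os.foldl (fun depended target =>
        ((PySem.Dict.mk td).getD target []).foldl (fun depended dep =>
          if aff.contains dep then PySem.Set.add depended dep else depended) depended) s
      ↔ t ∈ s ∨ ∃ o ∈ os, t ∈ (PySem.Dict.mk td).getD o [] ∧ t ∈ aff := by
  induction os generalizing s with
  | nil => simp
  | cons o os ih =>
    simp only [List.foldl_cons, ih, pv_mem_inner]
    constructor
    · rintro ((h1 | ⟨h1, h2⟩) | ⟨o', ho', h1, h2⟩)
      · exact .inl h1
      · exact .inr ⟨o, List.mem_cons_self, h1, h2⟩
      · exact .inr ⟨o', List.mem_cons_of_mem _ ho', h1, h2⟩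
    · rintro (h1 | ⟨o', ho', h1, h2⟩)
      · exact .inl (.inl h1)
      · rcases List.mem_cons.mp ho' with rfl | ho'
        · exact .inl (.inr ⟨h1, h2⟩)
        · exact .inr ⟨o', ho', h1, h2⟩

theorem compute_selective_build_targets_spec : Claim_equal_compute_selective_build_targets := by
  intro affected target_deps _
  unfold Spec_compute_selective_build_targets
  unfold compute_selective_build_targets compute_selective_build_targets_alt
  simp only [PySem.Set.diff]
  apply List.filter_congr
  intro t ht
  congr 1
  rw [Bool.eq_iff_iff, PySem.Set.contains_iff, pv_mem_outer, List.any_eq_true]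
  constructor
  · rintro (h | ⟨o, ho, h1, _⟩)
    · simp at h
    · exact ⟨o, ho, by simpa [PySem.Set.contains_iff] using h1⟩
  · rintro ⟨o, ho, hc⟩
    exact .inr ⟨o, ho, by simpa [PySem.Set.contains_iff] using hc, ht⟩
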